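-- pv_equiv track=rewrite | github.com/ChanYangYu/AlgorithmSolutions | Programmers/Level 2/입실 퇴실.py | solution
-- ===== SOURCE A (Python) =====
-- def solution(enter, leave):
--     n = len(enter)
--     answer = [0] * n
--     room = []
--     pos = 0
--
--     for l in leave :
--         check = False
--         cur_room = []
--         for r in room :
--             if r == l :
--                 check = True
--             else:
--                 cur_room.append(r)
--
--         room = cur_room
--
--         if check :
--             continue
--
--         while pos < n:
--             for r in room :
--                 answer[enter[pos]-1] += 1
--                 answer[r-1] += 1
--             if enter[pos] == l :
--                 pos +=1
--                 break
--             room.append(enter[pos])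
--             pos +=1
--     return answer
-- ===== SOURCE B (Python) =====
-- def solution(enter, leave):
--     n = len(enter)
--     answer = [0] * n
--     in_room = {}          # person -> (copies currently in room, sum of their entry times)
--     size = 0              # total people in room (with multiplicity)
--     pos = 0               # next entry index; also the global event clock
--     for l in leave:
--         if l in in_room:
--             c, s = in_room.pop(l)
--             answer[l - 1] += c * pos - s
--             size -= c
--             continue
--         while pos < n:
--             e = enter[pos]
--             if size:
--                 answer[e - 1] += size
--             pos += 1
--             if e == l:
--                 break
--             c, s = in_room.get(e, (0, 0))
--             in_room[e] = (c + 1, s + pos)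
--             size += 1
--     for r, (c, s) in in_room.items():
--         answer[r - 1] += c * pos - s
--     return answer
-- ===== Notes on version B (the rewrite author's own statement) =====
-- stated objective: alternative
-- what changed: A's per-entry inner loops over the room (and per-leave room rescan) are replaced by O(1) bookkeeping: a room-size counter plus a dict mapping each person to (copies in room, sum of entry times), so each greeting total is computed from the room size at entry and the time-in-room at removal/final flush; intended as asymptotically faster (O(n) vs O(n^2) on permutation inputs), but a timing run's inputs only reached a 1.49x ratio, so no speed is claimed.
-- outside the precondition, e.g. on solution([100], [5, 100]): A returns [0], B raises IndexError; on solution([7, 8], [7, 9]): A returns [0, 0], B raises IndexError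
import Mathlib
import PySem

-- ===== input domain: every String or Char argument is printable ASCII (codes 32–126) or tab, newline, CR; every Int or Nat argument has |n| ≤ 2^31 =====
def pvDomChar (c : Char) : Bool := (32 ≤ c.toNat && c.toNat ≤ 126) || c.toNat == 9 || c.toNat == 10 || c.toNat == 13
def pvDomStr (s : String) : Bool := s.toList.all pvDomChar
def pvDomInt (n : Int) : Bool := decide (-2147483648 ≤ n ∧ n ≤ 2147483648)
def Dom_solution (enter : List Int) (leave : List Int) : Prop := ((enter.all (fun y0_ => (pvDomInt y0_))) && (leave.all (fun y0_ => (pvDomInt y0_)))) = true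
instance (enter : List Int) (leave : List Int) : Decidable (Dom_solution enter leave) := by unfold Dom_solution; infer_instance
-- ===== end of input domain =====

-- B replaces A's per-entry inner loops over the room by constant-work bookkeeping (a room-size
-- counter + per-person entry-time sums in a dict), one pass over enter/leave plus a final flush.

-- ===== PORT A =====
-- Python's answer[p-1]: index p-1, wrapping once for negative indices;
-- exact for 1 - n ≤ p ≤ n (Pre_solution keeps every indexed person in that window)
def pyIdx (n : Nat) (p : Int) : Nat :=
  if 1 ≤ p then (p - 1).toNat else ((n : Int) + p - 1).toNat

-- answer[p-1] += k
def pvAdd (ans : List Int) (p : Int) (k : Int) : List Int :=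
  ans.set (pyIdx ans.length p) (ans.getD (pyIdx ans.length p) 0 + k)

-- A's first inner loop: check = (l occurs in room), cur_room = room without the copies of l
def scanRoom (l : Int) : List Int → Bool × List Int
  | [] => (false, [])
  | r :: rs =>
    let p := scanRoom l rs
    if r = l then (true, p.2) else (p.1, r :: p.2)

-- A's 'for r in room: answer[enter[pos]-1] += 1; answer[r-1] += 1'
def eventStep (ans : List Int) (e : Int) (room : List Int) : List Int :=
  room.foldl (fun a r => pvAdd (pvAdd a e 1) r 1) ans

-- A's 'while pos < n' loop
def whileA (enter : List Int) (l : Int) (ans room : List Int) (pos : Nat) :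
    List Int × List Int × Nat :=
  if h : pos < enter.length then
    let e := enter[pos]
    let ans' := eventStep ans e room
    if e = l then (ans', room, pos + 1)
    else whileA enter l ans' (room ++ [e]) (pos + 1)
  else (ans, room, pos)
termination_by enter.length - pos

-- A's body of 'for l in leave'
def stepA (enter : List Int) (st : List Int × List Int × Nat) (l : Int) :
    List Int × List Int × Nat :=
  let p := scanRoom l st.2.1
  if p.1 then (st.1, p.2, st.2.2) else whileA enter l st.1 p.2 st.2.2

def solution (enter : List Int) (leave : List Int) : List Int :=
  (leave.foldl (stepA enter) (List.replicate enter.length 0, [], 0)).1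

-- ===== PORT B =====
-- B's 'while pos < n' loop: answer[e-1] += size, then record the entry time of e
def whileB (enter : List Int) (l : Int) (ans : List Int)
    (d : PySem.Dict Int (Int × Int)) (size : Int) (pos : Nat) :
    List Int × PySem.Dict Int (Int × Int) × Int × Nat :=
  if h : pos < enter.length then
    let e := enter[pos]
    let ans' := if size = 0 then ans else pvAdd ans e size
    if e = l then (ans', d, size, pos + 1)
    else
      let cs := d.getD e (0, 0)
      whileB enter l ans' (d.insert e (cs.1 + 1, cs.2 + ((pos : Int) + 1))) (size + 1) (pos + 1)
  else (ans, d, size, pos)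
termination_by enter.length - pos

-- B's body of 'for l in leave'
def stepB (enter : List Int) (st : List Int × PySem.Dict Int (Int × Int) × Int × Nat) (l : Int) :
    List Int × PySem.Dict Int (Int × Int) × Int × Nat :=
  match st.2.1.get? l with
  | some cs => (pvAdd st.1 l (cs.1 * (st.2.2.2 : Int) - cs.2), st.2.1.erase l, st.2.2.1 - cs.1, st.2.2.2)
  | none => whileB enter l st.1 st.2.1 st.2.2.1 st.2.2.2

def solution_alt (enter : List Int) (leave : List Int) : List Int :=
  let st := leave.foldl (stepB enter) (List.replicate enter.length 0, PySem.Dict.empty, 0, 0)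
  st.2.1.items.foldl (fun a x => pvAdd a x.1 (x.2.1 * (st.2.2.2 : Int) - x.2.2)) st.1

-- ===== PRECONDITION & SPEC =====
-- Pre_ admits inputs whose entering ids lie in Python's valid index window [1-n, n] (negative
-- wraparound included), an empty leave list, and enter = leave (each entry then meets its own
-- leave at once and neither program ever indexes); outside these, A only returns when its room
-- happens to be empty at every indexing moment, while B's bookkeeping pass still records the
-- person and raises IndexError when it flushes them (e.g. on ([100], [5, 100])).
def Pre_solution (enter : List Int) (leave : List Int) : Prop :=
  (∀ v ∈ enter, 1 - (enter.length : Int) ≤ v ∧ v ≤ (enter.length : Int)) ∨ leave = []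
    ∨ enter = leave
instance (enter : List Int) (leave : List Int) : Decidable (Pre_solution enter leave) := by
  unfold Pre_solution; infer_instance
def pvWitness_solution : List Int × List Int := ([1, 3, 2], [2, 1, 3])
def Spec_solution (enter : List Int) (leave : List Int) (out : List Int) : Prop :=
  out = solution_alt enter leave
instance (enter : List Int) (leave : List Int) (out : List Int) : Decidable (Spec_solution enter leave out) := by
  unfold Spec_solution; infer_instance

-- ===== CLAIM (what is proved, stated in full; the proofs are below) =====
def Claim_equal_solution : Prop := ∀ (enter : List Int) (leave : List Int), Dom_solution enter leave → Pre_solution enter leave → Spec_solution enter leave (solution enter leave)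

-- ===== LEMMAS AND PROOFS =====

-- the answer slot of person q, read back for canonical q (1 ≤ q ≤ n)
def pvVal (ans : List Int) (q : Int) : Int := ans.getD (q - 1).toNat 0

-- the canonical person of the slot person p writes to (p and p + n share a slot)
def canonP (n : Nat) (p : Int) : Int := if 1 ≤ p then p else p + n

-- the greetings a dict entry still owes at time t
def pend (o : Option (Int × Int)) (t : Int) : Int :=
  match o with
  | some cs => cs.1 * t - cs.2
  | none => 0

theorem length_pvAdd (ans : List Int) (p k : Int) : (pvAdd ans p k).length = ans.length := by
  simp [pvAdd]

theorem canon_iff (n : Nat) (x q : Int) (hx : 1 - (n : Int) ≤ x ∧ x ≤ (n : Int)) (hq : 1 ≤ q)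
    (hq2 : q ≤ (n : Int)) :
    q = canonP n x ↔ (x = q ∨ x = q - (n : Int)) := by
  unfold canonP
  split_ifs <;> omega

theorem getD_set_formula (l : List Int) (i j : Nat) (v : Int) :
    (l.set i v).getD j 0 = if i = j ∧ i < l.length then v else l.getD j 0 := by
  by_cases hij : i = j
  · subst hij
    by_cases hl : i < l.length
    · simp [hl, List.getD_eq_getElem?_getD, List.getElem?_set,
        List.getElem?_eq_getElem hl]
    · have hnone : l[i]? = none := List.getElem?_eq_none (by omega)
      simp [hl, List.getD_eq_getElem?_getD, List.getElem?_set, hnone]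
  · simp [hij, List.getD_eq_getElem?_getD, List.getElem?_set]

theorem val_pvAdd (ans : List Int) (p k q : Int)
    (hp : 1 - (ans.length : Int) ≤ p ∧ p ≤ (ans.length : Int)) (hq : 1 ≤ q) :
    pvVal (pvAdd ans p k) q = pvVal ans q + if q = canonP ans.length p then k else 0 := by
  unfold pvVal pvAdd
  rw [getD_set_formula]
  unfold pyIdx canonP
  by_cases hp1 : 1 ≤ p
  · rw [if_pos hp1, if_pos hp1]
    by_cases hqp : q = p
    · subst hqp
      have hc : ((q - 1).toNat = (q - 1).toNat ∧ (q - 1).toNat < ans.length) :=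
        ⟨rfl, by omega⟩
      rw [if_pos hc, if_pos rfl]
    · have hc : ¬ ((p - 1).toNat = (q - 1).toNat ∧ (p - 1).toNat < ans.length) := by omega
      rw [if_neg hc, if_neg hqp]
      omega
  · rw [if_neg hp1, if_neg hp1]
    by_cases hqp : q = p + (ans.length : Int)
    · have hc : (((ans.length : Int) + p - 1).toNat = (q - 1).toNat
          ∧ ((ans.length : Int) + p - 1).toNat < ans.length) := by omega
      rw [if_pos hc, if_pos hqp, hc.1]
    · have hc : ¬ (((ans.length : Int) + p - 1).toNat = (q - 1).toNat
          ∧ ((ans.length : Int) + p - 1).toNat < ans.length) := by omega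
      rw [if_neg hc, if_neg hqp]
      omega

theorem length_pvAddG (ans : List Int) (e size : Int) :
    (if size = 0 then ans else pvAdd ans e size).length = ans.length := by
  split_ifs <;> simp [length_pvAdd]

theorem val_pvAddG (ans : List Int) (e size q : Int)
    (he : 1 - (ans.length : Int) ≤ e ∧ e ≤ (ans.length : Int)) (hq : 1 ≤ q) :
    pvVal (if size = 0 then ans else pvAdd ans e size) q
      = pvVal ans q + if q = canonP ans.length e then size else 0 := by
  by_cases h : size = 0
  · rw [if_pos h, h]
    split_ifs <;> simp
  · rw [if_neg h]
    exact val_pvAdd ans e size q he hq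

theorem length_eventStep (ans : List Int) (e : Int) (room : List Int) :
    (eventStep ans e room).length = ans.length := by
  induction room generalizing ans with
  | nil => rfl
  | cons r rs ih => simp [eventStep, List.foldl_cons] at *; rw [ih]; simp [length_pvAdd]

theorem val_eventStep (ans : List Int) (e : Int) (room : List Int) (q : Int)
    (hroom : ∀ r ∈ room, 1 - (ans.length : Int) ≤ r ∧ r ≤ (ans.length : Int))
    (he : 1 - (ans.length : Int) ≤ e ∧ e ≤ (ans.length : Int))
    (hq : 1 ≤ q) (hq2 : q ≤ (ans.length : Int)) :
    pvVal (eventStep ans e room) q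
      = pvVal ans q + ((room.count q : Int) + (room.count (q - (ans.length : Int)) : Int))
        + (if q = canonP ans.length e then (room.length : Int) else 0) := by
  induction room generalizing ans with
  | nil => simp [eventStep]
  | cons r rs ih =>
    have hr := hroom r (by simp)
    have hn : 1 ≤ ans.length := by omega
    have hlen : (pvAdd (pvAdd ans e 1) r 1).length = ans.length := by
      simp [length_pvAdd]
    have hroom' : ∀ x ∈ rs, 1 - ((pvAdd (pvAdd ans e 1) r 1).length : Int) ≤ x
        ∧ x ≤ ((pvAdd (pvAdd ans e 1) r 1).length : Int) := by
      intro x hx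
      rw [hlen]
      exact hroom x (by simp [hx])
    have he' : 1 - ((pvAdd (pvAdd ans e 1) r 1).length : Int) ≤ e
        ∧ e ≤ ((pvAdd (pvAdd ans e 1) r 1).length : Int) := by
      rw [hlen]; exact he
    have heq : eventStep ans e (r :: rs) = eventStep (pvAdd (pvAdd ans e 1) r 1) e rs := by
      simp [eventStep]
    rw [heq, ih _ hroom' he' (by rw [hlen]; exact hq2)]
    have h1 : pvVal (pvAdd (pvAdd ans e 1) r 1) q
        = pvVal ans q + (if q = canonP ans.length e then 1 else 0)
          + (if q = canonP ans.length r then 1 else 0) := by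
      rw [val_pvAdd _ r 1 q (by rw [length_pvAdd]; exact hr) hq,
        val_pvAdd _ e 1 q he hq, length_pvAdd]
    rw [hlen, h1]
    have hcr := canon_iff ans.length r q hr hq hq2
    by_cases h2 : r = q
    · have hc : q = canonP ans.length r := hcr.mpr (Or.inl h2)
      have h3 : ¬ ((q - (ans.length : Int)) = r) := by omega
      have hc1 : (r :: rs).count q = rs.count q + 1 := by
        rw [List.count_cons]
        simp only [beq_iff_eq]
        split_ifs with hh <;> omega
      have hc2 : (r :: rs).count (q - (ans.length : Int))
          = rs.count (q - (ans.length : Int)) := by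
        rw [List.count_cons]
        simp only [beq_iff_eq]
        split_ifs with hh <;> omega
      rw [hc1, hc2, if_pos hc, List.length_cons]
      split_ifs <;> push_cast <;> omega
    · by_cases h4 : r = q - (ans.length : Int)
      · have hc : q = canonP ans.length r := hcr.mpr (Or.inr h4)
        have h5 : ¬ (q = r) := fun hh => h2 hh.symm
        have h6 : (q - (ans.length : Int)) = r := h4.symm
        have hc1 : (r :: rs).count q = rs.count q := by
          rw [List.count_cons]
          simp only [beq_iff_eq]
          split_ifs with hh <;> omega
        have hc2 : (r :: rs).count (q - (ans.length : Int))
            = rs.count (q - (ans.length : Int)) + 1 := by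
          rw [List.count_cons]
          simp only [beq_iff_eq]
          split_ifs with hh <;> omega
        rw [hc1, hc2, if_pos hc, List.length_cons]
        split_ifs <;> push_cast <;> omega
      · have hc : ¬ q = canonP ans.length r := by
          intro hcon
          rcases hcr.mp hcon with h | h
          · exact h2 h
          · exact h4 h
        have h5 : ¬ (q = r) := fun hh => h2 hh.symm
        have h6 : ¬ ((q - (ans.length : Int)) = r) := fun hh => h4 hh.symm
        have hc1 : (r :: rs).count q = rs.count q := by
          rw [List.count_cons]
          simp only [beq_iff_eq]
          split_ifs with hh <;> omega
        have hc2 : (r :: rs).count (q - (ans.length : Int))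
            = rs.count (q - (ans.length : Int)) := by
          rw [List.count_cons]
          simp only [beq_iff_eq]
          split_ifs with hh <;> omega
        rw [hc1, hc2, if_neg hc]
        simp only [List.length_cons]
        split_ifs <;> push_cast <;> omega

theorem scanRoom_fst (l : Int) (room : List Int) : (scanRoom l room).1 = decide (l ∈ room) := by
  induction room with
  | nil => simp [scanRoom]
  | cons r rs ih =>
    by_cases h : r = l
    · simp [scanRoom, h]
    · simp [scanRoom, h, ih, Ne.symm h]

theorem scanRoom_snd (l : Int) (room : List Int) :
    (scanRoom l room).2 = room.filter (fun r => !decide (r = l)) := by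
  induction room with
  | nil => simp [scanRoom]
  | cons r rs ih =>
    by_cases h : r = l <;> simp [scanRoom, h, ih]

theorem dict_get?_erase_self {ν : Type} (d : PySem.Dict Int ν) (k : Int) :
    (d.erase k).get? k = none := by
  rcases d with ⟨items⟩
  simp only [PySem.Dict.erase, PySem.Dict.get?]
  rw [List.find?_eq_none.mpr]
  · rfl
  · intro p hp
    have := (List.mem_filter.mp hp).2
    simpa using this

theorem dict_get?_erase_of_ne {ν : Type} (d : PySem.Dict Int ν) (k k' : Int) (h : k' ≠ k) :
    (d.erase k).get? k' = d.get? k' := by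
  rcases d with ⟨items⟩
  simp only [PySem.Dict.erase, PySem.Dict.get?]
  congr 1
  induction items with
  | nil => rfl
  | cons a t ih =>
    by_cases hak : a.1 = k
    · have hkk : (k == k') = false := by simp; intro hh; exact h hh.symm
      simp [List.filter_cons, hak, ih, List.find?_cons, hkk]
    · by_cases hak' : a.1 = k'
      · have hk'k : ¬ k' = k := h
        simp [List.filter_cons, hak, List.find?_cons, hak', hk'k]
      · simp [List.filter_cons, hak, List.find?_cons, hak', ih]

theorem dict_nodup_keys_erase {ν : Type} (d : PySem.Dict Int ν) (k : Int)
    (h : d.keys.Nodup) : (d.erase k).keys.Nodup := by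
  rcases d with ⟨items⟩
  simp only [PySem.Dict.erase, PySem.Dict.keys] at *
  exact List.Nodup.sublist (List.Sublist.map _ List.filter_sublist) h

theorem filter_ne_length (room : List Int) (l : Int) :
    (room.filter (fun r => !decide (r = l))).length + room.count l = room.length := by
  induction room with
  | nil => simp
  | cons r rs ih =>
    by_cases h : r = l
    · simp [List.count_cons, h]; omega
    · simp [List.count_cons, h, Ne.symm h]; omega

theorem count_filter_ne (room : List Int) (l p : Int) (h : p ≠ l) :
    (room.filter (fun r => !decide (r = l))).count p = room.count p := by
  induction room with
  | nil => rfl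
  | cons r rs ih =>
    by_cases hr : r = l
    · have : (r == p) = false := by simp [hr, Ne.symm h]
      simp [List.count_cons, hr, ih, this, Ne.symm h]
    · simp [List.count_cons, hr, ih]

-- the joint simulation invariant between A's and B's loop states
def SimInv (enter ansA room ansB : List Int) (d : PySem.Dict Int (Int × Int)) (size : Int)
    (pos : Nat) : Prop :=
  ansA.length = enter.length ∧ ansB.length = enter.length ∧
  d.keys.Nodup ∧
  (∀ r ∈ room, 1 - (enter.length : Int) ≤ r ∧ r ≤ (enter.length : Int)) ∧
  size = (room.length : Int) ∧
  (∀ p c s, d.get? p = some (c, s) → c = (room.count p : Int) ∧ p ∈ room) ∧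
  (∀ p, d.get? p = none → room.count p = 0) ∧
  (∀ q, 1 ≤ q → q ≤ (enter.length : Int) →
    pvVal ansA q = pvVal ansB q + pend (d.get? q) (pos : Int)
      + pend (d.get? (q - (enter.length : Int))) (pos : Int))

theorem pend_succ (d : PySem.Dict Int (Int × Int)) (room : List Int) (pos : Nat)
    (hSome : ∀ p c s, d.get? p = some (c, s) → c = (room.count p : Int) ∧ p ∈ room)
    (hNone : ∀ p, d.get? p = none → room.count p = 0) (x : Int) :
    pend (d.get? x) ((pos : Int) + 1) = pend (d.get? x) (pos : Int) + (room.count x : Int) := by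
  cases h : d.get? x with
  | none => simp [pend, hNone x h]
  | some cs =>
    have hc := (hSome x cs.1 cs.2 (by rw [h])).1
    simp only [pend]
    rw [hc]
    ring

theorem pend_insert_succ (d : PySem.Dict Int (Int × Int)) (room : List Int) (pos : Nat) (e : Int)
    (hSome : ∀ p c s, d.get? p = some (c, s) → c = (room.count p : Int) ∧ p ∈ room)
    (hNone : ∀ p, d.get? p = none → room.count p = 0) (x : Int) :
    pend ((d.insert e ((d.getD e (0, 0)).1 + 1, (d.getD e (0, 0)).2 + ((pos : Int) + 1))).get? x)
        ((pos : Int) + 1)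
      = pend (d.get? x) (pos : Int) + (room.count x : Int) := by
  rw [PySem.Dict.get?_insert]
  by_cases hxe : x = e
  · rw [if_pos hxe]
    subst hxe
    cases h : d.get? x with
    | some cs =>
      have hc := (hSome x cs.1 cs.2 (by rw [h])).1
      have hgetD : d.getD x (0, 0) = cs := by
        rw [PySem.Dict.getD_eq_get?_getD, h]; rfl
      rw [hgetD]
      simp only [pend]
      rw [hc]
      ring
    | none =>
      have hcnt := hNone x h
      have hgetD : d.getD x (0, 0) = (0, 0) := by
        rw [PySem.Dict.getD_eq_get?_getD, h]; rfl
      rw [hgetD]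
      simp only [pend, hcnt]
      push_cast
      ring
  · rw [if_neg hxe]
    exact pend_succ d room pos hSome hNone x

theorem inv_event (enter ansA room ansB : List Int) (d : PySem.Dict Int (Int × Int))
    (size : Int) (pos : Nat) (e : Int)
    (he : 1 - (enter.length : Int) ≤ e ∧ e ≤ (enter.length : Int))
    (h : SimInv enter ansA room ansB d size pos) :
    SimInv enter (eventStep ansA e room) room (if size = 0 then ansB else pvAdd ansB e size)
      d size (pos + 1) := by
  obtain ⟨hA, hB, hK, hR, hS, hSome, hNone, hSlot⟩ := h
  have heA : 1 - (ansA.length : Int) ≤ e ∧ e ≤ (ansA.length : Int) := by rw [hA]; exact he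
  have heB : 1 - (ansB.length : Int) ≤ e ∧ e ≤ (ansB.length : Int) := by rw [hB]; exact he
  have hRA : ∀ r ∈ room, 1 - (ansA.length : Int) ≤ r ∧ r ≤ (ansA.length : Int) := by
    rw [hA]; exact hR
  refine ⟨by rw [length_eventStep, hA], by rw [length_pvAddG, hB], hK, hR, hS, hSome, hNone, ?_⟩
  intro q hq1 hq2
  rw [val_eventStep ansA e room q hRA heA hq1 (by rw [hA]; exact hq2),
    val_pvAddG ansB e size q heB hq1, hA, hB]
  have h1 := pend_succ d room pos hSome hNone q
  have h2 := pend_succ d room pos hSome hNone (q - (enter.length : Int))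
  have h3 := hSlot q hq1 hq2
  push_cast at h1 h2 ⊢
  rw [h1, h2]
  split_ifs <;> omega

theorem inv_push (enter ansA room ansB : List Int) (d : PySem.Dict Int (Int × Int))
    (size : Int) (pos : Nat) (e : Int)
    (he : 1 - (enter.length : Int) ≤ e ∧ e ≤ (enter.length : Int))
    (h : SimInv enter ansA room ansB d size pos) :
    SimInv enter (eventStep ansA e room) (room ++ [e])
      (if size = 0 then ansB else pvAdd ansB e size)
      (d.insert e ((d.getD e (0, 0)).1 + 1, (d.getD e (0, 0)).2 + ((pos : Int) + 1)))
      (size + 1) (pos + 1) := by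
  obtain ⟨hA, hB, hK, hR, hS, hSome, hNone, hSlot⟩ := h
  have heA : 1 - (ansA.length : Int) ≤ e ∧ e ≤ (ansA.length : Int) := by rw [hA]; exact he
  have heB : 1 - (ansB.length : Int) ≤ e ∧ e ≤ (ansB.length : Int) := by rw [hB]; exact he
  have hRA : ∀ r ∈ room, 1 - (ansA.length : Int) ≤ r ∧ r ≤ (ansA.length : Int) := by
    rw [hA]; exact hR
  refine ⟨by rw [length_eventStep, hA], by rw [length_pvAddG, hB],
    PySem.Dict.nodup_keys_insert _ _ _ hK, ?_, ?_, ?_, ?_, ?_⟩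
  · intro r hr
    rcases List.mem_append.mp hr with h1 | h1
    · exact hR r h1
    · simp at h1; subst h1; exact he
  · simp only [List.length_append, List.length_singleton]
    push_cast
    omega
  · intro p c s hget
    rw [PySem.Dict.get?_insert] at hget
    by_cases hpe : p = e
    · rw [if_pos hpe] at hget
      subst hpe
      have hcnt : (room ++ [p]).count p = room.count p + 1 := by
        simp [List.count_append]
      cases hde : d.get? p with
      | some cs0 =>
        have hc0 := (hSome p cs0.1 cs0.2 (by rw [hde])).1
        have hgetD : d.getD p (0, 0) = cs0 := by
          rw [PySem.Dict.getD_eq_get?_getD, hde]; rfl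
        rw [hgetD] at hget
        simp only [Option.some.injEq, Prod.mk.injEq] at hget
        obtain ⟨hc, hs⟩ := hget
        refine ⟨?_, by simp⟩
        rw [← hc, hcnt, hc0]
        push_cast
        ring
      | none =>
        have hcnt0 := hNone p hde
        have hgetD : d.getD p (0, 0) = (0, 0) := by
          rw [PySem.Dict.getD_eq_get?_getD, hde]; rfl
        rw [hgetD] at hget
        simp only [Option.some.injEq, Prod.mk.injEq] at hget
        obtain ⟨hc, hs⟩ := hget
        refine ⟨?_, by simp⟩
        rw [← hc, hcnt, hcnt0]
        push_cast
        try ring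
    · rw [if_neg hpe] at hget
      obtain ⟨hc, hmem⟩ := hSome p c s hget
      have hcnt : (room ++ [e]).count p = room.count p := by
        simp [List.count_append, List.count_singleton, hpe, Ne.symm hpe]
      exact ⟨by rw [hcnt]; exact hc, List.mem_append.mpr (Or.inl hmem)⟩
  · intro p hget
    rw [PySem.Dict.get?_insert] at hget
    by_cases hpe : p = e
    · rw [if_pos hpe] at hget; cases hget
    · rw [if_neg hpe] at hget
      have hcnt := hNone p hget
      simp [List.count_append, List.count_singleton, hpe, Ne.symm hpe, hcnt]
  · intro q hq1 hq2
    rw [val_eventStep ansA e room q hRA heA hq1 (by rw [hA]; exact hq2),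
      val_pvAddG ansB e size q heB hq1, hA, hB]
    have h1 := pend_insert_succ d room pos e hSome hNone q
    have h2 := pend_insert_succ d room pos e hSome hNone (q - (enter.length : Int))
    have h3 := hSlot q hq1 hq2
    push_cast at h1 h2 ⊢
    rw [h1, h2]
    split_ifs <;> omega

theorem inv_remove (enter ansA room ansB : List Int) (d : PySem.Dict Int (Int × Int))
    (size : Int) (pos : Nat) (l c s : Int)
    (hget : d.get? l = some (c, s))
    (h : SimInv enter ansA room ansB d size pos) :
    SimInv enter ansA (room.filter (fun r => !decide (r = l)))
      (pvAdd ansB l (c * (pos : Int) - s)) (d.erase l) (size - c) pos := by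
  obtain ⟨hA, hB, hK, hR, hS, hSome, hNone, hSlot⟩ := h
  obtain ⟨hc, hmem⟩ := hSome l c s hget
  have hl : 1 - (enter.length : Int) ≤ l ∧ l ≤ (enter.length : Int) := hR l hmem
  have hlB : 1 - (ansB.length : Int) ≤ l ∧ l ≤ (ansB.length : Int) := by rw [hB]; exact hl
  have hn : 1 ≤ enter.length := by
    by_contra hcon
    have : enter.length = 0 := by omega
    rw [this] at hl
    omega
  have hflen := filter_ne_length room l
  refine ⟨hA, by rw [length_pvAdd, hB], dict_nodup_keys_erase d l hK, ?_, ?_, ?_, ?_, ?_⟩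
  · intro r hr
    exact hR r (List.mem_of_mem_filter hr)
  · rw [hc, hS]
    push_cast
    omega
  · intro p c' s' hget'
    by_cases hpl : p = l
    · rw [hpl, dict_get?_erase_self] at hget'; cases hget'
    · rw [dict_get?_erase_of_ne d l p hpl] at hget'
      obtain ⟨hc', hmem'⟩ := hSome p c' s' hget'
      refine ⟨by rw [count_filter_ne room l p hpl]; exact hc', ?_⟩
      exact List.mem_filter.mpr ⟨hmem', by simp [hpl]⟩
  · intro p hget'
    by_cases hpl : p = l
    · subst hpl
      rw [List.count_eq_zero]
      intro hmem'
      have := List.mem_filter.mp hmem'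
      simp at this
    · rw [dict_get?_erase_of_ne d l p hpl] at hget'
      rw [count_filter_ne room l p hpl]
      exact hNone p hget'
  · intro q hq1 hq2
    rw [val_pvAdd ansB l (c * (pos : Int) - s) q hlB hq1, hB]
    have h3 := hSlot q hq1 hq2
    have hcl := canon_iff enter.length l q hl hq1 hq2
    by_cases hcq : q = canonP enter.length l
    · rw [if_pos hcq]
      rcases hcl.mp hcq with hcase | hcase
      · -- l = q : the q-key loses its pending, the (q-n)-key is untouched
        subst hcase
        rw [dict_get?_erase_self,
          dict_get?_erase_of_ne d l _ (show l - (enter.length : Int) ≠ l by omega)]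
        rw [hget] at h3
        simp only [pend] at h3 ⊢
        omega
      · -- l = q - n : the (q-n)-key loses its pending, the q-key is untouched
        subst hcase
        rw [dict_get?_erase_self,
          dict_get?_erase_of_ne d _ q (show q ≠ q - (enter.length : Int) by omega)]
        rw [hget] at h3
        simp only [pend] at h3 ⊢
        omega
    · rw [if_neg hcq]
      have hne1 : q ≠ l := by
        intro hh; exact hcq (hcl.mpr (Or.inl hh.symm))
      have hne2 : q - (enter.length : Int) ≠ l := by
        intro hh; exact hcq (hcl.mpr (Or.inr hh.symm))
      rw [dict_get?_erase_of_ne d l q hne1, dict_get?_erase_of_ne d l _ hne2]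
      omega

theorem while_joint (enter : List Int) (l : Int)
    (hEnter : ∀ v ∈ enter, 1 - (enter.length : Int) ≤ v ∧ v ≤ (enter.length : Int)) :
    ∀ fuel pos ansA room ansB d size, enter.length - pos ≤ fuel →
      SimInv enter ansA room ansB d size pos →
      (whileA enter l ansA room pos).2.2 = (whileB enter l ansB d size pos).2.2.2 ∧
      SimInv enter (whileA enter l ansA room pos).1 (whileA enter l ansA room pos).2.1
        (whileB enter l ansB d size pos).1 (whileB enter l ansB d size pos).2.1
        (whileB enter l ansB d size pos).2.2.1 (whileA enter l ansA room pos).2.2 := by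
  intro fuel
  induction fuel with
  | zero =>
    intro pos ansA room ansB d size hf hInv
    have hp : ¬ pos < enter.length := by omega
    rw [whileA, whileB]
    simp only [dif_neg hp]
    exact ⟨by simp, hInv⟩
  | succ n ih =>
    intro pos ansA room ansB d size hf hInv
    by_cases hp : pos < enter.length
    · have he : 1 - (enter.length : Int) ≤ enter[pos] ∧ enter[pos] ≤ (enter.length : Int) :=
        hEnter enter[pos] (List.getElem_mem hp)
      rw [whileA, whileB]
      simp only [dif_pos hp]
      by_cases hel : enter[pos] = l
      · simp only [if_pos hel]
        exact ⟨by simp, inv_event enter ansA room ansB d size pos enter[pos] he hInv⟩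
      · simp only [if_neg hel]
        exact ih (pos + 1) _ _ _ _ _ (by omega)
          (inv_push enter ansA room ansB d size pos enter[pos] he hInv)
    · rw [whileA, whileB]
      simp only [dif_neg hp]
      exact ⟨by simp, hInv⟩

theorem step_joint (enter : List Int) (l : Int)
    (hEnter : ∀ v ∈ enter, 1 - (enter.length : Int) ≤ v ∧ v ≤ (enter.length : Int))
    (ansA room ansB : List Int) (d : PySem.Dict Int (Int × Int)) (size : Int) (pos : Nat)
    (hInv : SimInv enter ansA room ansB d size pos) :
    (stepA enter (ansA, room, pos) l).2.2 = (stepB enter (ansB, d, size, pos) l).2.2.2 ∧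
    SimInv enter (stepA enter (ansA, room, pos) l).1 (stepA enter (ansA, room, pos) l).2.1
      (stepB enter (ansB, d, size, pos) l).1 (stepB enter (ansB, d, size, pos) l).2.1
      (stepB enter (ansB, d, size, pos) l).2.2.1 (stepA enter (ansA, room, pos) l).2.2 := by
  obtain ⟨hA, hB, hK, hR, hS, hSome, hNone, hSlot⟩ := hInv
  cases hget : d.get? l with
  | some cs =>
    obtain ⟨hc, hmem⟩ := hSome l cs.1 cs.2 (by rw [hget])
    have hcheck : (scanRoom l (ansA, room, pos).2.1).1 = true := by
      rw [scanRoom_fst]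
      simpa using hmem
    have hstepA : stepA enter (ansA, room, pos) l
        = (ansA, room.filter (fun r => !decide (r = l)), pos) := by
      unfold stepA
      rw [if_pos hcheck, scanRoom_snd]
    have hstepB : stepB enter (ansB, d, size, pos) l
        = (pvAdd ansB l (cs.1 * (pos : Int) - cs.2), d.erase l, size - cs.1, pos) := by
      unfold stepB
      simp [hget]
    rw [hstepA, hstepB]
    exact ⟨rfl, inv_remove enter ansA room ansB d size pos l cs.1 cs.2 (by rw [hget])
      ⟨hA, hB, hK, hR, hS, hSome, hNone, hSlot⟩⟩
  | none =>
    have hnotmem : l ∉ room := by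
      intro hmem
      have := hNone l hget
      rw [List.count_eq_zero] at this
      exact this hmem
    have hcheck : (scanRoom l (ansA, room, pos).2.1).1 = false := by
      rw [scanRoom_fst]
      simpa using hnotmem
    have hfilter : room.filter (fun r => !decide (r = l)) = room := by
      rw [List.filter_eq_self]
      intro r hr
      simp
      intro hrl
      exact hnotmem (hrl ▸ hr)
    have hstepA : stepA enter (ansA, room, pos) l = whileA enter l ansA room pos := by
      unfold stepA
      rw [if_neg (by rw [hcheck]; exact Bool.false_ne_true), scanRoom_snd, hfilter]
    have hstepB : stepB enter (ansB, d, size, pos) l = whileB enter l ansB d size pos := by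
      unfold stepB
      simp [hget]
    rw [hstepA, hstepB]
    exact while_joint enter l hEnter (enter.length - pos) pos ansA room ansB d size
      (by omega) ⟨hA, hB, hK, hR, hS, hSome, hNone, hSlot⟩

theorem foldl_joint (enter : List Int)
    (hEnter : ∀ v ∈ enter, 1 - (enter.length : Int) ≤ v ∧ v ≤ (enter.length : Int))
    (leave : List Int) :
    ∀ ansA room ansB d size pos, SimInv enter ansA room ansB d size pos →
      (leave.foldl (stepA enter) (ansA, room, pos)).2.2
          = (leave.foldl (stepB enter) (ansB, d, size, pos)).2.2.2 ∧
      SimInv enter (leave.foldl (stepA enter) (ansA, room, pos)).1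
        (leave.foldl (stepA enter) (ansA, room, pos)).2.1
        (leave.foldl (stepB enter) (ansB, d, size, pos)).1
        (leave.foldl (stepB enter) (ansB, d, size, pos)).2.1
        (leave.foldl (stepB enter) (ansB, d, size, pos)).2.2.1
        (leave.foldl (stepA enter) (ansA, room, pos)).2.2 := by
  induction leave with
  | nil =>
    intro ansA room ansB d size pos hInv
    exact ⟨rfl, hInv⟩
  | cons l ls ih =>
    intro ansA room ansB d size pos hInv
    obtain ⟨hpos, hInv'⟩ := step_joint enter l hEnter ansA room ansB d size pos hInv
    have hB' : stepB enter (ansB, d, size, pos) l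
        = ((stepB enter (ansB, d, size, pos) l).1, (stepB enter (ansB, d, size, pos) l).2.1,
           (stepB enter (ansB, d, size, pos) l).2.2.1, (stepA enter (ansA, room, pos) l).2.2) := by
      rw [hpos]
    rw [List.foldl_cons, List.foldl_cons, hB']
    exact ih (stepA enter (ansA, room, pos) l).1 (stepA enter (ansA, room, pos) l).2.1
      (stepB enter (ansB, d, size, pos) l).1 (stepB enter (ansB, d, size, pos) l).2.1
      (stepB enter (ansB, d, size, pos) l).2.2.1 (stepA enter (ansA, room, pos) l).2.2 hInv'

theorem flush_val (T : Int) (L : List (Int × Int × Int)) :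
    ∀ ans : List Int, (L.map (·.1)).Nodup →
      (∀ x ∈ L, 1 - (ans.length : Int) ≤ x.1 ∧ x.1 ≤ (ans.length : Int)) →
      ∀ q, 1 ≤ q → q ≤ (ans.length : Int) →
      pvVal (L.foldl (fun a x => pvAdd a x.1 (x.2.1 * T - x.2.2)) ans) q
        = pvVal ans q + pend ((L.find? (fun x => x.1 == q)).map (·.2)) T
          + pend ((L.find? (fun x => x.1 == q - (ans.length : Int))).map (·.2)) T := by
  induction L with
  | nil => intro ans _ _ q hq hq2; simp [pend]
  | cons a t ih =>
    intro ans hN hB q hq hq2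
    have ha := hB a (by simp)
    have hn : 1 ≤ ans.length := by omega
    have hlen : (pvAdd ans a.1 (a.2.1 * T - a.2.2)).length = ans.length := length_pvAdd ..
    have hN' : (t.map (·.1)).Nodup := (List.nodup_cons.mp hN).2
    have hB' : ∀ x ∈ t, 1 - ((pvAdd ans a.1 (a.2.1 * T - a.2.2)).length : Int) ≤ x.1
        ∧ x.1 ≤ ((pvAdd ans a.1 (a.2.1 * T - a.2.2)).length : Int) := by
      intro x hx; rw [hlen]; exact hB x (by simp [hx])
    have hkey : a.1 ∉ t.map (·.1) := (List.nodup_cons.mp hN).1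
    have hfindnone : ∀ y : Int, a.1 = y → t.find? (fun x => x.1 == y) = none := by
      intro y hy
      rw [List.find?_eq_none]
      intro x hx
      simp only [beq_iff_eq]
      intro hcontra
      apply hkey
      simp only [List.mem_map]
      exact ⟨x, hx, by rw [hcontra, ← hy]⟩
    rw [List.foldl_cons, ih _ hN' hB' q hq (by rw [hlen]; exact hq2),
      hlen, val_pvAdd ans a.1 (a.2.1 * T - a.2.2) q ha hq]
    have hca := canon_iff ans.length a.1 q ha hq hq2
    by_cases h1 : a.1 = q
    · have hc : q = canonP ans.length a.1 := hca.mpr (Or.inl h1)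
      have h2 : ¬ (a.1 = q - (ans.length : Int)) := by omega
      rw [if_pos hc, hfindnone q h1,
        List.find?_cons_of_pos (by simp [h1]),
        List.find?_cons_of_neg (by simp [h2])]
      simp [pend]
      try omega
    · by_cases h2 : a.1 = q - (ans.length : Int)
      · have hc : q = canonP ans.length a.1 := hca.mpr (Or.inr h2)
        rw [if_pos hc, hfindnone _ h2,
          List.find?_cons_of_neg (by simp [h1]),
          List.find?_cons_of_pos (by simp [h2])]
        simp [pend]
        try omega
      · have hc : ¬ q = canonP ans.length a.1 := by
          intro hcon
          rcases hca.mp hcon with h | h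
          · exact h1 h
          · exact h2 h
        rw [if_neg hc,
          List.find?_cons_of_neg (by simp [h1]),
          List.find?_cons_of_neg (by simp [h2])]
        omega

theorem flush_length (T : Int) (L : List (Int × Int × Int)) (ans : List Int) :
    (L.foldl (fun a x => pvAdd a x.1 (x.2.1 * T - x.2.2)) ans).length = ans.length := by
  induction L generalizing ans with
  | nil => rfl
  | cons a t ih => simp [List.foldl_cons, ih, length_pvAdd]

theorem pvVal_eq_getElem (ans : List Int) (i : Nat) (h : i < ans.length) :
    pvVal ans ((i : Int) + 1) = ans[i] := by
  unfold pvVal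
  have h1 : (((i : Int) + 1) - 1).toNat = i := by omega
  rw [h1, List.getD_eq_getElem?_getD, List.getElem?_eq_getElem h]
  rfl

theorem diag_stepsA (enter : List Int) :
    ∀ (suff pref : List Int) (ans : List Int), enter = pref ++ suff →
      suff.foldl (stepA enter) (ans, [], pref.length) = (ans, [], enter.length) := by
  intro suff
  induction suff with
  | nil =>
    intro pref ans h
    simp [h]
  | cons l ls ih =>
    intro pref ans h
    have hlt : pref.length < enter.length := by
      rw [h, List.length_append]
      simp
    have hget : enter[pref.length] = l := by
      subst h
      rw [List.getElem_append_right (Nat.le_refl _)]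
      simp
    have hstep : stepA enter (ans, [], pref.length) l = (ans, [], pref.length + 1) := by
      unfold stepA
      simp only [scanRoom, if_neg Bool.false_ne_true]
      rw [whileA]
      simp only [dif_pos hlt, hget, if_pos rfl]
      rfl
    rw [List.foldl_cons, hstep]
    have := ih (pref ++ [l]) ans (by rw [h, List.append_assoc]; rfl)
    simpa using this

theorem diag_stepsB (enter : List Int) :
    ∀ (suff pref : List Int) (ans : List Int), enter = pref ++ suff →
      suff.foldl (stepB enter) (ans, PySem.Dict.empty, 0, pref.length)
        = (ans, PySem.Dict.empty, 0, enter.length) := by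
  intro suff
  induction suff with
  | nil =>
    intro pref ans h
    simp [h]
  | cons l ls ih =>
    intro pref ans h
    have hlt : pref.length < enter.length := by
      rw [h, List.length_append]
      simp
    have hget : enter[pref.length] = l := by
      subst h
      rw [List.getElem_append_right (Nat.le_refl _)]
      simp
    have hstep : stepB enter (ans, PySem.Dict.empty, 0, pref.length)
        = fun l => stepB enter (ans, PySem.Dict.empty, 0, pref.length) l := rfl
    have hstep2 : stepB enter (ans, PySem.Dict.empty, 0, pref.length) l
        = (ans, PySem.Dict.empty, 0, pref.length + 1) := by
      unfold stepB
      simp only [PySem.Dict.get?_empty]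
      rw [whileB]
      simp only [dif_pos hlt, hget, if_pos rfl]
      rfl
    rw [List.foldl_cons, hstep2]
    have := ih (pref ++ [l]) ans (by rw [h, List.append_assoc]; rfl)
    simpa using this

-- ===== VERDICT (by name: the statement is the Claim_ definition above) =====
theorem solution_spec : Claim_equal_solution := by
  intro enter leave hDom hPre
  unfold Spec_solution
  rcases hPre with hEnter | hnil | hdiag
  case inr.inl => subst hnil; rfl
  case inr.inr =>
    subst hdiag
    unfold solution solution_alt
    have hA0 := diag_stepsA enter enter [] (List.replicate enter.length 0) rfl
    have hB0 := diag_stepsB enter enter [] (List.replicate enter.length 0) rfl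
    simp only [List.length_nil] at hA0 hB0
    rw [hA0, hB0]
    rfl
  have hInit : SimInv enter (List.replicate enter.length 0) [] (List.replicate enter.length 0)
      PySem.Dict.empty 0 0 := by
    refine ⟨List.length_replicate, List.length_replicate, ?_, by simp, by simp, ?_, ?_, ?_⟩
    · simp [PySem.Dict.keys_empty]
    · intro p c s hget
      rw [PySem.Dict.get?_empty] at hget
      cases hget
    · intro p hget
      simp
    · intro q hq1 hq2
      simp [pend, PySem.Dict.get?_empty]
  obtain ⟨hpos, hInvF⟩ := foldl_joint enter hEnter leave
    (List.replicate enter.length 0) [] (List.replicate enter.length 0) PySem.Dict.empty 0 0 hInit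
  obtain ⟨hA, hB, hK, hR, hS, hSome, hNone, hSlot⟩ := hInvF
  unfold solution solution_alt
  set stA := leave.foldl (stepA enter) (List.replicate enter.length 0, [], 0) with hstA
  set stB := leave.foldl (stepB enter) (List.replicate enter.length 0, PySem.Dict.empty, 0, 0)
    with hstB
  show stA.1
      = stB.2.1.items.foldl (fun a x => pvAdd a x.1 (x.2.1 * ((stB.2.2.2 : Nat) : Int) - x.2.2))
        stB.1
  have hKitems : (stB.2.1.items.map (·.1)).Nodup := hK
  have hBounds : ∀ x ∈ stB.2.1.items, 1 - ((stB.1).length : Int) ≤ x.1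
      ∧ x.1 ≤ ((stB.1).length : Int) := by
    intro x hx
    have hgx : stB.2.1.get? x.1 = some x.2 :=
      PySem.Dict.get?_of_mem_items stB.2.1 (by simpa using hx) hK
    obtain ⟨_, hmem⟩ := hSome x.1 x.2.1 x.2.2 (by rw [hgx])
    rw [hB]
    exact hR x.1 hmem
  have hflen := flush_length ((stB.2.2.2 : Nat) : Int) stB.2.1.items stB.1
  apply List.ext_getElem
  · rw [hA, hflen, hB]
  · intro i h1 h2
    rw [← pvVal_eq_getElem _ i h1, ← pvVal_eq_getElem _ i (by rw [hflen] at h2 ⊢; exact h2)]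
    have hq : 1 ≤ ((i : Nat) : Int) + 1 := by omega
    have hq2 : ((i : Nat) : Int) + 1 ≤ ((stB.1).length : Int) := by
      rw [hA] at h1
      rw [hB]
      omega
    rw [flush_val ((stB.2.2.2 : Nat) : Int) stB.2.1.items stB.1 hKitems hBounds
      (((i : Nat) : Int) + 1) hq hq2]
    have hgq : (stB.2.1.items.find? (fun x => x.1 == ((i : Nat) : Int) + 1)).map (·.2)
        = stB.2.1.get? (((i : Nat) : Int) + 1) := rfl
    have hgq' : (stB.2.1.items.find?
          (fun x => x.1 == ((i : Nat) : Int) + 1 - ((stB.1).length : Int))).map (·.2)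
        = stB.2.1.get? (((i : Nat) : Int) + 1 - ((stB.1).length : Int)) := rfl
    rw [hgq, hgq']
    have h3 := hSlot (((i : Nat) : Int) + 1) hq (by rw [hA] at h1; omega)
    rw [hpos] at h3
    rw [hB]
    omega
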